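-- pv_equiv track=rewrite | github.com/kimjihw/Programmers | Level 0/한 번만 등장한 문자.py | solution
-- ===== SOURCE A (Python) =====
-- import collections
--
-- def solution(s):
--     answer = ''
--     value = list(collections.Counter(s).values())
--     key = list(collections.Counter(s).keys())
--     lst = []
--
--     for i in range(len(value)):
--         if value[i] == 1:
--             lst.append(key[i])
--     for i in sorted(lst):
--         answer += str(i)
--
--     return answer
-- ===== SOURCE B (Python) =====
-- def solution(s):
--     t = sorted(s)
--     out = []
--     i, n = 0, len(t)
--     while i < n:
--         j = i + 1
--         while j < n and t[j] == t[i]: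
--             j += 1
--         if j - i == 1:
--             out.append(t[i])
--         i = j
--     return ''.join(out)
-- ===== Notes on version B (the rewrite author's own statement) =====
-- stated objective: alternative
-- what changed: Replaces A's pipeline of building a Counter twice, index-looping over its values/keys lists and sorting the survivors by a single sort of the string followed by one run-length scan that keeps each character whose maximal run has length 1.
import Mathlib
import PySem

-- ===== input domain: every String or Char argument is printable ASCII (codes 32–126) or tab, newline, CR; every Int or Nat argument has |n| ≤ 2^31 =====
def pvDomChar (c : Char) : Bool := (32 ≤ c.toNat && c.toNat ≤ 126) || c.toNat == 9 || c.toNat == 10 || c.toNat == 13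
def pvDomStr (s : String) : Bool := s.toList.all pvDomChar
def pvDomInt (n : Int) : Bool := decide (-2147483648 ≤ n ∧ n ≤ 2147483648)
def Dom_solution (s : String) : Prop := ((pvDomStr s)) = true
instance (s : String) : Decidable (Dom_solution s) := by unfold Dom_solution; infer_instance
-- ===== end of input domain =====

-- B replaces A's double Counter build + index loop + final sort by a single sort followed by a run-length scan (alternative algorithm, same result).

-- ===== PORT A =====
def solution (s : String) : String :=
  let answer : String := ""
  let value : List Int := (PySem.Dict.counter s.toList).values
  let key : List Char := (PySem.Dict.counter s.toList).keys
  let lst : List Char := (PySem.List.pyRange 0 (value.length : Int) 1).foldl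
      (fun lst i => if PySem.List.pyGetD value i 0 = 1 then lst ++ [PySem.List.pyGetD key i ' '] else lst) []
  (PySem.List.sorted lst (fun x => x) false).foldl (fun answer c => answer ++ String.ofList [c]) answer

-- ===== PORT B =====
-- run-length scan over the sorted character list: each outer-while step consumes one
-- maximal run (the inner while = takeWhile/dropWhile) and keeps the character iff its run has length 1
def runScan : List Char → List Char
  | [] => []
  | c :: rest =>
    if (rest.takeWhile (fun d => d == c)).length = 0
    then c :: runScan (rest.dropWhile (fun d => d == c))
    else runScan (rest.dropWhile (fun d => d == c))
termination_by t => t.length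
decreasing_by all_goals
  exact Nat.lt_succ_of_le (List.length_dropWhile_le _ _)

def solution_alt (s : String) : String :=
  String.ofList (runScan (PySem.List.sorted s.toList (fun x => x) false))

-- ===== PRECONDITION & SPEC =====
def Spec_solution (s : String) (out : String) : Prop := out = solution_alt s
instance (s : String) (out : String) : Decidable (Spec_solution s out) := by unfold Spec_solution; infer_instance

-- ===== CLAIM (what is proved, stated in full; the proofs are below) =====
def Claim_equal_solution : Prop := ∀ (s : String), Dom_solution s → Spec_solution s (solution s)

-- ===== LEMMAS AND PROOFS =====

-- the first element surviving dropWhile fails the predicate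
theorem dropWhile_head_false {p : Char → Bool} : ∀ (l : List Char) (e : Char) (tl : List Char),
    l.dropWhile p = e :: tl → p e = false := by
  intro l
  induction l with
  | nil => intro e tl h; simp [List.dropWhile] at h
  | cons x xs ih =>
    intro e tl h
    rw [List.dropWhile_cons] at h
    by_cases hx : p x
    · rw [if_pos hx] at h; exact ih e tl h
    · rw [if_neg hx] at h
      injection h with h1 h2
      subst h1
      simpa using hx

-- in a sorted list, everything left after dropping the leading run of c is strictly greater than c
theorem dropWhile_gt (c : Char) (rest : List Char) (hle : ∀ d ∈ rest, c ≤ d)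
    (hrest : rest.Pairwise (· ≤ ·)) :
    ∀ d ∈ rest.dropWhile (fun d => d == c), c < d := by
  intro d hd
  cases hre : rest.dropWhile (fun d => d == c) with
  | nil => rw [hre] at hd; simp at hd
  | cons e tl =>
    have h0 : rest.dropWhile (fun d => d == c) ≠ [] := by rw [hre]; simp
    have hne : (e == c) = false := dropWhile_head_false rest e tl hre
    have hemem : e ∈ rest := (List.dropWhile_sublist _).subset (by rw [hre]; simp)
    have hce : c < e := lt_of_le_of_ne (hle e hemem) (by intro h; subst h; simp at hne)
    have hpw' : (e :: tl).Pairwise (· ≤ ·) := hre ▸ hrest.sublist (List.dropWhile_sublist _)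
    rw [hre] at hd
    rcases List.mem_cons.mp hd with rfl | hd'
    · exact hce
    · exact lt_of_lt_of_le hce ((List.pairwise_cons.mp hpw').1 d hd')

-- on a sorted list, runScan returns exactly the characters of count 1, in strictly increasing order
theorem runScan_facts : ∀ (n : Nat) (t : List Char), t.length ≤ n → t.Pairwise (· ≤ ·) →
    (∀ c, c ∈ runScan t ↔ c ∈ t ∧ t.count c = 1) ∧ (runScan t).Pairwise (· < ·) := by
  intro n
  induction n with
  | zero =>
    intro t ht _
    have : t = [] := List.length_eq_zero_iff.mp (Nat.le_zero.mp ht)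
    subst this
    simp [runScan]
  | succ n ih =>
    intro t hlen hpw
    match t with
    | [] => simp [runScan]
    | c :: rest =>
      obtain ⟨hle, hrest⟩ := List.pairwise_cons.mp hpw
      have hsplit : rest.takeWhile (fun d => d == c) ++ rest.dropWhile (fun d => d == c) = rest :=
        List.takeWhile_append_dropWhile
      have hrunc : ∀ d ∈ rest.takeWhile (fun d => d == c), d = c := by
        intro d hd
        have := List.mem_takeWhile_imp hd
        simpa using this
      have hgt : ∀ d ∈ rest.dropWhile (fun d => d == c), c < d := dropWhile_gt c rest hle hrest
      have hcnot : c ∉ rest.dropWhile (fun d => d == c) := fun h => lt_irrefl c (hgt c h)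
      have hpw' : (rest.dropWhile (fun d => d == c)).Pairwise (· ≤ ·) :=
        hrest.sublist (List.dropWhile_sublist _)
      have hlen' : (rest.dropWhile (fun d => d == c)).length ≤ n := by
        have := List.length_dropWhile_le (fun d => d == c) rest
        simp at hlen; omega
      obtain ⟨ihmem, ihpw⟩ := ih (rest.dropWhile (fun d => d == c)) hlen' hpw'
      have hcnt_c : (c :: rest).count c = (rest.takeWhile (fun d => d == c)).length + 1 := by
        rw [List.count_cons_self]
        congr 1
        conv_lhs => rw [← hsplit]
        rw [List.count_append, List.count_eq_length.mpr (fun b hb => (hrunc b hb).symm),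
            List.count_eq_zero.mpr hcnot, Nat.add_zero]
      have hcnt_ne : ∀ d, d ≠ c → (c :: rest).count d = (rest.dropWhile (fun d => d == c)).count d := by
        intro d hdc
        have h1 : List.count d (c :: rest) = List.count d rest := by
          simp [Ne.symm hdc]
        rw [h1]
        conv_lhs => rw [← hsplit]
        rw [List.count_append, List.count_eq_zero.mpr (fun hd => hdc (hrunc d hd)), Nat.zero_add]
      have hmem_ne : ∀ d, d ≠ c → (d ∈ rest.dropWhile (fun d => d == c) ↔ d ∈ c :: rest) := by
        intro d hdc
        constructor
        · intro hd; exact List.mem_cons_of_mem _ ((List.dropWhile_sublist _).subset hd)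
        · intro hd
          rcases List.mem_cons.mp hd with h | h
          · exact absurd h hdc
          · rw [← hsplit] at h
            rcases List.mem_append.mp h with h | h
            · exact absurd (hrunc d h) hdc
            · exact h
      by_cases hc : (rest.takeWhile (fun d => d == c)).length = 0
      · -- the run is empty: c appears exactly once, keep it
        have hrs : runScan (c :: rest) = c :: runScan (rest.dropWhile (fun d => d == c)) := by
          rw [runScan]; simp [hc]
        constructor
        · intro d
          rw [hrs]
          by_cases hdc : d = c
          · subst hdc
            constructor
            · intro _
              refine ⟨List.mem_cons_self, ?_⟩
              rw [hcnt_c, hc]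
            · intro _
              exact List.mem_cons_self
          · rw [List.mem_cons, or_iff_right hdc, ihmem d,
               hmem_ne d hdc, hcnt_ne d hdc]
        · rw [hrs]
          exact List.pairwise_cons.mpr ⟨fun d hd => hgt d ((ihmem d).mp hd).1, ihpw⟩
      · -- the run is non-empty: c appears at least twice, drop the whole run
        have hrs : runScan (c :: rest) = runScan (rest.dropWhile (fun d => d == c)) := by
          rw [runScan]; simp [hc]
        refine ⟨fun d => ?_, hrs ▸ ihpw⟩
        rw [hrs, ihmem d]
        by_cases hdc : d = c
        · subst hdc
          simp only [hcnt_c]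
          constructor
          · intro ⟨h, _⟩; exact absurd h hcnot
          · intro ⟨_, h⟩; omega
        · rw [hmem_ne d hdc, hcnt_ne d hdc]

theorem foldl_str_append (cs : List Char) (a : String) :
    cs.foldl (fun ans c => ans ++ String.ofList [c]) a = a ++ String.ofList cs := by
  induction cs generalizing a with
  | nil => simp
  | cons c cs ih =>
    rw [List.foldl_cons, ih, String.append_assoc]
    congr 1
    rw [← String.ofList_append]
    rfl

theorem solution_spec : Claim_equal_solution := by
  unfold Claim_equal_solution
  intro s _
  unfold Spec_solution solution solution_alt
  simp only []
  have hkeys : (PySem.Dict.counter s.toList).keys = PySem.Set.ofList s.toList :=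
    PySem.Dict.keys_counter _
  have hvals : (PySem.Dict.counter s.toList).values
      = (PySem.Set.ofList s.toList).map (fun k => (List.count k s.toList : Int)) := by
    simp only [PySem.Dict.values, PySem.Dict.items_counter, List.map_map]
    rfl
  rw [hkeys, hvals]
  -- the index loop over range(len(value)) is the filter "count = 1" over the counter's keys
  have hloop :
      (PySem.List.pyRange 0 (((PySem.Set.ofList s.toList).map (fun k => (List.count k s.toList : Int))).length : Int)).foldl
        (fun lst i => if PySem.List.pyGetD ((PySem.Set.ofList s.toList).map (fun k => (List.count k s.toList : Int))) i 0 = 1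
                      then lst ++ [PySem.List.pyGetD (PySem.Set.ofList s.toList) i ' '] else lst) []
      = (PySem.Set.ofList s.toList).filter (fun k => decide ((List.count k s.toList : Int) = 1)) := by
    rw [List.length_map, ← PySem.List.len_eq,
        PySem.List.foldl_congr_mem _ _
          (fun lst i => (fun acc k => if (List.count k s.toList : Int) = 1 then acc ++ [k] else acc) lst
             (PySem.List.pyGetD (PySem.Set.ofList s.toList) i ' ')) _
          (by
            intro acc i hi
            obtain ⟨h0, h1⟩ := PySem.List.mem_pyRange_one.mp hi
            rw [PySem.List.len_eq] at h1
            rw [PySem.List.pyGetD_eq_getElem _ _ h0 (by simpa using h1),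
                PySem.List.pyGetD_eq_getElem _ _ h0 h1, List.getElem_map]
            simp [PySem.List.pyGetD_eq_getElem _ _ h0 h1]),
        PySem.List.foldl_pyRange_zero_pyGetD (PySem.Set.ofList s.toList) ' '
          (fun acc k => if ((List.count k s.toList : Int)) = 1 then acc ++ [k] else acc) [],
        PySem.List.foldl_append_ite_eq_filter]
    simp
  rw [hloop]
  -- both sides are the strictly increasing enumeration of the characters of count 1
  have hpwt : (PySem.List.sorted s.toList (fun x => x) false).Pairwise (· ≤ ·) := by
    simpa using PySem.List.sorted_pairwise s.toList (fun x => x)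
  obtain ⟨hmem, hpw⟩ := runScan_facts _ (PySem.List.sorted s.toList (fun x => x) false) le_rfl hpwt
  have hperm : (runScan (PySem.List.sorted s.toList (fun x => x) false)).Perm
      ((PySem.Set.ofList s.toList).filter (fun k => decide ((List.count k s.toList : Int) = 1))) := by
    rw [List.perm_ext_iff_of_nodup (hpw.imp ne_of_lt)
        ((PySem.Set.nodup_ofList s.toList).filter _)]
    intro a
    rw [hmem a, List.mem_filter]
    have hc : (PySem.List.sorted s.toList (fun x => x) false).count a = s.toList.count a :=
      (PySem.List.sorted_perm s.toList (fun x => x) false).count_eq a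
    rw [hc, PySem.List.mem_sorted]
    constructor
    · intro ⟨h1, h2⟩
      exact ⟨(PySem.Set.mem_ofList s.toList a).mpr h1, by simp [h2]⟩
    · intro ⟨h1, h2⟩
      refine ⟨(PySem.Set.mem_ofList s.toList a).mp h1, ?_⟩
      simp at h2
      exact_mod_cast h2
  rw [PySem.List.sorted_eq_of_perm_of_pairwise_lt _ _ (fun x => x) hperm (by simpa using hpw)]
  rw [foldl_str_append]
  simp
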